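-- pv_equiv track=rewrite | github.com/makavelj/CLA | compress/cla_util.py | word_alphabet
-- ===== SOURCE A (Python) =====
-- def word_alphabet(omega):
--     omega = sorted(omega)
--     dict = {}
--     alphabet = []
--     j = 0
--     for c in omega:
--         if(not(c in dict)):
--             dict[c] = j
--             j += 1
--             alphabet.append(c)
--     return(alphabet)
-- ===== SOURCE B (Python) =====
-- def word_alphabet(omega):
--     return sorted(set(omega))
-- ===== Notes on version B (the rewrite author's own statement) =====
-- stated objective: idiomatic
-- what changed: Deduplicates first with a hash set and then sorts only the distinct elements (sorted(set(omega))), instead of sorting everything and scanning the sorted list with a dict of seen keys and a counter.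
import Mathlib
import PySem

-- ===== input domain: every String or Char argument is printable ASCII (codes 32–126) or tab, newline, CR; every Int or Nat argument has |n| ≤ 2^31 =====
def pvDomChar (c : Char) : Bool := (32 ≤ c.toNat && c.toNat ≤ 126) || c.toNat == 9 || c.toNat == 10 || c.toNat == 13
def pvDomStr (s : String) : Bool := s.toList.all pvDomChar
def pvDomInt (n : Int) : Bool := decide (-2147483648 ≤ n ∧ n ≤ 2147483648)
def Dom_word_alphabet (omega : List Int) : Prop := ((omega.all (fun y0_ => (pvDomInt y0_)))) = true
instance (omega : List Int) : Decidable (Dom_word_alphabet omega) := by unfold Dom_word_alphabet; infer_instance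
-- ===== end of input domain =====

-- B deduplicates first with a hash set and then sorts the distinct elements (sorted(set(omega))),
-- instead of A's sort-then-scan with a dict of seen keys and a counter; objective: idiomatic.

-- ===== PORT A =====
-- omega = sorted(omega); for c in omega: if not (c in dict): dict[c] = j; j += 1; alphabet.append(c)
def word_alphabet (omega : List Int) : List Int :=
  let omega' := PySem.List.sorted omega (fun x => x) false
  let st := omega'.foldl
    (fun (s : PySem.Dict Int Int × List Int × Int) c =>
      if s.1.contains c then s
      else (s.1.insert c s.2.2, s.2.1 ++ [c], s.2.2 + 1))
    (PySem.Dict.empty, [], 0)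
  st.2.1

-- ===== PORT B =====
-- return sorted(set(omega))  (identity sort key is injective, so the set's order cannot matter)
def word_alphabet_alt (omega : List Int) : List Int :=
  PySem.List.sorted (PySem.Set.ofList omega) (fun x => x) false

-- ===== PRECONDITION & SPEC =====
def Spec_word_alphabet (omega : List Int) (out : List Int) : Prop := out = word_alphabet_alt omega
instance (omega : List Int) (out : List Int) : Decidable (Spec_word_alphabet omega out) := by unfold Spec_word_alphabet; infer_instance

-- ===== CLAIM (what is proved, stated in full; the proofs are below) =====
def Claim_equal_word_alphabet : Prop := ∀ (omega : List Int), Dom_word_alphabet omega → Spec_word_alphabet omega (word_alphabet omega)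

-- ===== LEMMAS AND PROOFS =====

-- Loop invariant for A's scan over the sorted list: the accumulator stays strictly
-- increasing and collects exactly the elements seen so far.
theorem pv_loop (l : List Int) :
    ∀ (d : PySem.Dict Int Int) (a : List Int) (j : Int),
    l.Pairwise (· ≤ ·) →
    (∀ x, d.contains x = true ↔ x ∈ a) →
    a.Pairwise (· < ·) →
    (∀ x ∈ a, ∀ y ∈ l, x ≤ y) →
    (let r := (l.foldl
      (fun (s : PySem.Dict Int Int × List Int × Int) c =>
        if s.1.contains c then s
        else (s.1.insert c s.2.2, s.2.1 ++ [c], s.2.2 + 1)) (d, a, j)).2.1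
     r.Pairwise (· < ·) ∧ ∀ x, x ∈ r ↔ (x ∈ a ∨ x ∈ l)) := by
  induction l with
  | nil =>
    intro d a j _ _ ha _
    exact ⟨ha, by simp⟩
  | cons c t ih =>
    intro d a j hsort hd ha hle
    rcases List.pairwise_cons.mp hsort with ⟨hct, hts⟩
    simp only [List.foldl_cons]
    by_cases hc : c ∈ a
    · have hdc : d.contains c = true := (hd c).mpr hc
      rw [if_pos hdc]
      obtain ⟨hr, hm⟩ := ih d a j hts hd ha
        (fun x hx y hy => hle x hx y (List.mem_cons_of_mem _ hy))
      refine ⟨hr, fun x => ?_⟩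
      rw [hm x, List.mem_cons]
      constructor
      · tauto
      · rintro (h | rfl | h) <;> tauto
    · have hdc : d.contains c = false := by
        cases h : d.contains c
        · rfl
        · exact absurd ((hd c).mp h) hc
      rw [if_neg (by simp [hdc])]
      have ha' : (a ++ [c]).Pairwise (· < ·) := by
        rw [List.pairwise_append]
        refine ⟨ha, by simp, ?_⟩
        intro x hx y hy
        rw [List.mem_singleton] at hy; subst hy
        have h1 : x ≤ y := hle x hx y (List.mem_cons_self ..)
        have h2 : x ≠ y := fun h => hc (h ▸ hx)
        omega
      obtain ⟨hr, hm⟩ := ih (d.insert c j) (a ++ [c]) (j + 1) hts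
        (by
          intro x
          rw [PySem.Dict.contains_insert]
          simp only [List.mem_append, List.mem_singleton, Bool.or_eq_true, beq_iff_eq]
          rw [hd x]; tauto)
        ha'
        (by
          intro x hx y hy
          rcases List.mem_append.mp hx with hx | hx
          · exact hle x hx y (List.mem_cons_of_mem _ hy)
          · rw [List.mem_singleton] at hx; subst hx; exact hct y hy)
      refine ⟨hr, fun x => ?_⟩
      rw [hm x]
      simp only [List.mem_append, List.mem_cons]
      tauto

-- ===== VERDICT (by name: the statement is the Claim_ definition above) =====
theorem word_alphabet_spec : Claim_equal_word_alphabet := by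
  intro omega _
  unfold Spec_word_alphabet word_alphabet word_alphabet_alt
  obtain ⟨hr, hm⟩ := pv_loop (PySem.List.sorted omega (fun x => x) false)
    PySem.Dict.empty [] 0
    (by simpa using PySem.List.sorted_pairwise omega (fun x => x) (κ := Int))
    (by intro x; simp [PySem.Dict.contains_empty])
    List.Pairwise.nil
    (by intro x hx; cases hx)
  -- A's result is a strictly increasing rearrangement of set(omega); name the sorted order.
  refine (PySem.List.sorted_eq_of_perm_of_pairwise_lt _ _ (fun x => x) ?_ (by simpa using hr)).symm
  apply (List.perm_ext_iff_of_nodup (hr.imp ne_of_lt)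
    (PySem.Set.nodup_ofList omega)).mpr
  intro x
  rw [hm x]
  simp [PySem.Set.mem_ofList, PySem.List.mem_sorted]
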